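-- pv_equiv track=rewrite | github.com/DenBugNBA/yandex_algorithms_trainings_3 | 1. Stacks/15_The_Great_Lineland_migration.py | find_migration_cities
-- ===== SOURCE A (Python) =====
-- def find_migration_cities(average_prices, n):
--     stack = []
--
--     result_cities = [0] * n
--
--     for i in range(n):
--         current_average_price = average_prices[i]
--
--         while stack and current_average_price < stack[-1][0]:
--             result_cities[stack.pop()[1]] = i
--
--         stack.append((current_average_price, i))
--
--     while stack:
--         result_cities[stack.pop()[1]] = -1
--
--     return result_cities
-- ===== SOURCE B (Python) =====
-- def find_migration_cities(average_prices, n):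
--     def next_cheaper(i):
--         for j in range(i + 1, n):
--             if average_prices[j] < average_prices[i]:
--                 return j
--         return -1
--
--     return [next_cheaper(i) for i in range(n)]
-- ===== Notes on version B (the rewrite author's own statement) =====
-- stated objective: simpler
-- what changed: Replaced the monotonic-stack one-pass algorithm (push/pop with deferred assignment into a preallocated array) by a direct per-index forward scan for the first cheaper city, built with a list comprehension.
import Mathlib
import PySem

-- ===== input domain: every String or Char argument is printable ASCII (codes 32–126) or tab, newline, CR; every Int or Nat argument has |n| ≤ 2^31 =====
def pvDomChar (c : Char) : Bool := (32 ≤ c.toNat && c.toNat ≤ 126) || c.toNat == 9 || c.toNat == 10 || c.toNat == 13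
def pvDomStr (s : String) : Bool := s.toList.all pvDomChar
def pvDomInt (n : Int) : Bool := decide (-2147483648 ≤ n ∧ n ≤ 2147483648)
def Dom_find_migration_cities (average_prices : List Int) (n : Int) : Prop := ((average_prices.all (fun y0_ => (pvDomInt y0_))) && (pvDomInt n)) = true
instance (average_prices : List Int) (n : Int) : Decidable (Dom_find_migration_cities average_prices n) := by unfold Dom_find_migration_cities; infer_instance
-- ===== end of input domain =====

-- B replaces A's monotonic stack by a direct per-index forward scan (simpler, not faster).

-- ===== PORT A =====
-- the inner 'while stack and current < stack[-1][0]: result[stack.pop()[1]] = i' loop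
-- (stack head = Python's stack[-1]; popped index j is a loop counter, hence 0 ≤ j, so .toNat is exact)
def pvPopA (i cur : Int) : List (Int × Int) → List Int → List (Int × Int) × List Int
  | [], res => ([], res)
  | (v, j) :: rest, res =>
      if cur < v then pvPopA i cur rest (res.set j.toNat i)
      else ((v, j) :: rest, res)

-- the trailing 'while stack: result[stack.pop()[1]] = -1' loop
def pvDrainA : List (Int × Int) → List Int → List Int
  | [], res => res
  | (_, j) :: rest, res => pvDrainA rest (res.set j.toNat (-1))

def find_migration_cities (average_prices : List Int) (n : Int) : List Int :=
  -- result_cities = [0] * n  ([] when n < 0, as in Python)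
  let st := (PySem.List.pyRange 0 n 1).foldl
    (fun (st : List (Int × Int) × List Int) i =>
      -- average_prices[i]: 0 ≤ i < n ≤ len under Pre_, so getD is exact (Python raises otherwise)
      let cur := PySem.List.pyGetD average_prices i 0
      let p := pvPopA i cur st.1 st.2
      ((cur, i) :: p.1, p.2))
    ([], List.replicate n.toNat 0)
  pvDrainA st.1 st.2

-- ===== PORT B =====
-- 'for j in range(i+1, n): if a[j] < a[i]: return j / return -1'; indices are in [0, n) ⊆ [0, len)
-- under Pre_, so Nat indexing with getD is exact
def pvNextCheaper (a : List Int) (x : Int) (j m : Nat) : Int :=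
  if _h : j < m then
    if a.getD j 0 < x then (j : Int) else pvNextCheaper a x (j + 1) m
  else -1
termination_by m - j

def find_migration_cities_alt (average_prices : List Int) (n : Int) : List Int :=
  (List.range n.toNat).map
    (fun i => pvNextCheaper average_prices (average_prices.getD i 0) (i + 1) n.toNat)

-- ===== PRECONDITION & SPEC =====
-- Pre_ excludes exactly n > len(average_prices), where Python A raises IndexError at average_prices[i].
def Pre_find_migration_cities (average_prices : List Int) (n : Int) : Prop :=
  n ≤ (average_prices.length : Int)
instance (average_prices : List Int) (n : Int) : Decidable (Pre_find_migration_cities average_prices n) := by unfold Pre_find_migration_cities; infer_instance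

def pvWitness_find_migration_cities : List Int × Int := ([3, 1, 4, 1, 5], 5)

def Spec_find_migration_cities (average_prices : List Int) (n : Int) (out : List Int) : Prop := out = find_migration_cities_alt average_prices n
instance (average_prices : List Int) (n : Int) (out : List Int) : Decidable (Spec_find_migration_cities average_prices n out) := by unfold Spec_find_migration_cities; infer_instance

-- ===== CLAIM (what is proved, stated in full; the proofs are below) =====
def Claim_equal_find_migration_cities : Prop := ∀ (average_prices : List Int) (n : Int), Dom_find_migration_cities average_prices n → Pre_find_migration_cities average_prices n → Spec_find_migration_cities average_prices n (find_migration_cities average_prices n)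

-- ===== LEMMAS AND PROOFS =====

-- Nat-indexed model of A's loop state (stack of indices; values are recomputed via getD)
def mpop (a : List Int) (i : Nat) : List Nat → List Int → List Nat × List Int
  | [], r => ([], r)
  | j :: rest, r =>
      if a.getD i 0 < a.getD j 0 then mpop a i rest (r.set j (i : Int))
      else (j :: rest, r)

def mstep (a : List Int) (st : List Nat × List Int) (i : Nat) : List Nat × List Int :=
  let p := mpop a i st.1 st.2
  (i :: p.1, p.2)

def mdrain : List Nat → List Int → List Int
  | [], r => r
  | j :: rest, r => mdrain rest (r.set j (-1))

def repS (a : List Int) (s : List Nat) : List (Int × Int) :=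
  s.map (fun j => (a.getD j 0, (j : Int)))

-- the per-index answer B computes
def nsp (a : List Int) (m i : Nat) : Int := pvNextCheaper a (a.getD i 0) (i + 1) m

-- A-loop invariant after processing prefix [0, i)
def InvA (a : List Int) (m i : Nat) (s : List Nat) (r : List Int) : Prop :=
  r.length = m ∧ i ≤ m ∧
  (∀ j ∈ s, j < i) ∧
  List.Pairwise (fun x y => y < x ∧ a.getD y 0 ≤ a.getD x 0) s ∧
  (∀ j ∈ s, ∀ k, j < k → k < i → a.getD j 0 ≤ a.getD k 0) ∧
  (∀ j, j < i → j ∉ s → r.getD j 0 = nsp a m j)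

theorem nc_eq_of (a : List Int) (x : Int) (m : Nat) :
    ∀ lo k : Nat, lo ≤ k → k < m → (∀ t, lo ≤ t → t < k → ¬ a.getD t 0 < x) →
    a.getD k 0 < x → pvNextCheaper a x lo m = (k : Int) := by
  intro lo k hlk hkm hmin hk
  induction lo using pvNextCheaper.induct a x (m := m) with
  | case1 lo hlo hlt =>
      rcases Nat.eq_or_lt_of_le hlk with h | h
      · rw [pvNextCheaper, dif_pos hlo, if_pos (h ▸ hk), h]
      · exact absurd hlt (hmin lo le_rfl h)
  | case2 lo hlo hge ih =>
      rcases Nat.eq_or_lt_of_le hlk with h | h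
      · exact absurd (h ▸ hk) hge
      · rw [pvNextCheaper, dif_pos hlo, if_neg hge]
        exact ih h (fun t ht => hmin t (by omega))
  | case3 lo hlo => omega

theorem nc_none (a : List Int) (x : Int) (m : Nat) :
    ∀ lo : Nat, (∀ t, lo ≤ t → t < m → ¬ a.getD t 0 < x) → pvNextCheaper a x lo m = -1 := by
  intro lo
  induction lo using pvNextCheaper.induct a x (m := m) with
  | case1 lo hlo hlt => intro hall; exact absurd hlt (hall lo le_rfl hlo)
  | case2 lo hlo hge ih =>
      intro hall
      rw [pvNextCheaper, dif_pos hlo, if_neg hge]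
      exact ih (fun t ht => hall t (by omega))
  | case3 lo hlo => intro _; rw [pvNextCheaper, dif_neg hlo]

theorem getD_set_self (r : List Int) (j : Nat) (v : Int) (h : j < r.length) :
    (r.set j v).getD j 0 = v := by
  simp [List.getD, h]

theorem getD_set_ne (r : List Int) (j k : Nat) (v : Int) (h : k ≠ j) :
    (r.set j v).getD k 0 = r.getD k 0 := by
  simp [List.getD, List.getElem?_set_ne (by omega : j ≠ k)]

theorem mpop_inv (a : List Int) (m i : Nat) (hi : i < m) :
    ∀ s r, InvA a m i s r →
      InvA a m i (mpop a i s r).1 (mpop a i s r).2 ∧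
      (∀ hd rest, (mpop a i s r).1 = hd :: rest → ¬ a.getD i 0 < a.getD hd 0) := by
  intro s
  induction s with
  | nil =>
      intro r h
      exact ⟨h, by intro hd rest hh; simp [mpop] at hh⟩
  | cons j rest ih =>
      intro r h
      obtain ⟨hlen, him, hlt, hpw, hmin, hres⟩ := h
      have hji : j < i := hlt j List.mem_cons_self
      by_cases hc : a.getD i 0 < a.getD j 0
      · rw [show mpop a i (j :: rest) r = mpop a i rest (r.set j (i : Int)) from by
          rw [mpop, if_pos hc]]
        apply ih
        refine ⟨by simp [hlen], him, fun j' hj' => hlt j' (List.mem_cons_of_mem _ hj'),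
          hpw.of_cons, fun j' hj' => hmin j' (List.mem_cons_of_mem _ hj'), ?_⟩
        intro j' hj'i hj's
        by_cases hjj : j' = j
        · subst hjj
          rw [getD_set_self r j' (i : Int) (by omega)]
          refine (nc_eq_of a (a.getD j' 0) m (j' + 1) i (by omega) hi ?_ hc).symm
          intro t ht1 ht2 hcon
          exact absurd (hmin j' List.mem_cons_self t (by omega) ht2) (by omega)
        · rw [getD_set_ne r j j' (i : Int) hjj]
          exact hres j' hj'i (by simp [hjj, hj's])
      · rw [show mpop a i (j :: rest) r = (j :: rest, r) from by rw [mpop, if_neg hc]]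
        refine ⟨⟨hlen, him, hlt, hpw, hmin, hres⟩, ?_⟩
        intro hd rs hh
        have : hd = j := by simpa using (congrArg (fun l => l.headI) hh).symm
        simpa [this] using hc

theorem mstep_inv (a : List Int) (m i : Nat) (hi : i < m) (s : List Nat) (r : List Int)
    (h : InvA a m i s r) : InvA a m (i + 1) (mstep a (s, r) i).1 (mstep a (s, r) i).2 := by
  obtain ⟨hinv, hhd⟩ := mpop_inv a m i hi s r h
  obtain ⟨hlen, him, hlt, hpw, hmin, hres⟩ := hinv
  have hdom : ∀ y ∈ (mpop a i s r).1, a.getD y 0 ≤ a.getD i 0 := by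
    intro y hy
    rcases hq : (mpop a i s r).1 with _ | ⟨hd, rs⟩
    · simp [hq] at hy
    · have hhd' := hhd hd rs hq
      rw [hq] at hy
      rcases List.mem_cons.mp hy with h1 | h1
      · subst h1; omega
      · have := (List.pairwise_cons.mp (hq ▸ hpw)).1 y h1
        omega
  simp only [mstep]
  refine ⟨hlen, by omega, ?_, ?_, ?_, ?_⟩
  · intro j hj
    rcases List.mem_cons.mp hj with h1 | h1
    · omega
    · have := hlt j h1; omega
  · refine List.pairwise_cons.mpr ⟨?_, hpw⟩
    intro y hy
    exact ⟨hlt y hy, hdom y hy⟩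
  · intro j hj k hk1 hk2
    rcases List.mem_cons.mp hj with h1 | h1
    · omega
    · rcases Nat.lt_or_ge k i with h2 | h2
      · exact hmin j h1 k hk1 h2
      · have : k = i := by omega
        subst this
        exact hdom j h1
  · intro j hj1 hj2
    have hne : j ≠ i := fun he => hj2 (he ▸ List.mem_cons_self)
    exact hres j (by omega) (fun hm => hj2 (List.mem_cons_of_mem _ hm))

theorem fold_inv (a : List Int) (m : Nat) :
    ∀ (k i : Nat) (s : List Nat) (r : List Int), i + k ≤ m → InvA a m i s r →
      InvA a m (i + k) ((List.range' i k).foldl (mstep a) (s, r)).1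
        ((List.range' i k).foldl (mstep a) (s, r)).2 := by
  intro k
  induction k with
  | zero => intro i s r _ h; simpa using h
  | succ k ih =>
      intro i s r hle h
      have h1 := mstep_inv a m i (by omega) s r h
      have h2 := ih (i + 1) (mstep a (s, r) i).1 (mstep a (s, r) i).2 (by omega) h1
      rw [List.range'_succ, List.foldl_cons]
      have : (i + 1) + k = i + (k + 1) := by omega
      rw [this] at h2
      exact h2

theorem mdrain_length : ∀ (s : List Nat) (r : List Int), (mdrain s r).length = r.length := by
  intro s; induction s with
  | nil => intro r; rfl
  | cons j rest ih => intro r; simp [mdrain, ih]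

theorem mdrain_inv (a : List Int) (m : Nat) :
    ∀ s r, InvA a m m s r → ∀ j, j < m → (mdrain s r).getD j 0 = nsp a m j := by
  intro s
  induction s with
  | nil =>
      intro r h j hj
      exact h.2.2.2.2.2 j hj (by simp)
  | cons j rest ih =>
      intro r h
      obtain ⟨hlen, him, hlt, hpw, hmin, hres⟩ := h
      have hjm : j < m := hlt j List.mem_cons_self
      have hnodup : j ∉ rest := fun hc => by
        have := (List.pairwise_cons.mp hpw).1 j hc; omega
      apply ih
      refine ⟨by simp [hlen], him, fun j' hj' => hlt j' (List.mem_cons_of_mem _ hj'),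
        hpw.of_cons, fun j' hj' => hmin j' (List.mem_cons_of_mem _ hj'), ?_⟩
      intro j' hj'm hj's
      by_cases hjj : j' = j
      · subst hjj
        rw [getD_set_self r j' (-1) (by omega)]
        refine (nc_none a (a.getD j' 0) m (j' + 1) ?_).symm
        intro t ht1 ht2 hcon
        exact absurd (hmin j' List.mem_cons_self t (by omega) ht2) (by omega)
      · rw [getD_set_ne r j j' (-1) hjj]
        exact hres j' hj'm (by simp [hjj, hj's])

theorem pop_bridge (a : List Int) (i : Nat) :
    ∀ s r, pvPopA (i : Int) (a.getD i 0) (repS a s) r =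
      (repS a (mpop a i s r).1, (mpop a i s r).2) := by
  intro s
  induction s with
  | nil => intro r; rfl
  | cons j rest ih =>
      intro r
      simp only [repS, List.map_cons, pvPopA, mpop, Int.toNat_natCast]
      split
      · exact ih (r.set j (i : Int))
      · rfl

theorem drain_bridge (a : List Int) :
    ∀ s r, pvDrainA (repS a s) r = mdrain s r := by
  intro s
  induction s with
  | nil => intro r; rfl
  | cons j rest ih => intro r; simpa [repS, pvDrainA, mdrain] using ih (r.set j (-1))

theorem port_bridge (a : List Int) :
    ∀ (l : List Nat) (s : List Nat) (r : List Int),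
      l.foldl
        (fun (st : List (Int × Int) × List Int) (k : Nat) =>
          let cur := PySem.List.pyGetD a (k : Int) 0
          let p := pvPopA (k : Int) cur st.1 st.2
          ((cur, (k : Int)) :: p.1, p.2)) (repS a s, r) =
      (repS a (l.foldl (mstep a) (s, r)).1, (l.foldl (mstep a) (s, r)).2) := by
  intro l
  induction l with
  | nil => intro s r; rfl
  | cons k rest ih =>
      intro s r
      rw [List.foldl_cons, List.foldl_cons]
      have hcur : PySem.List.pyGetD a ((k : Nat) : Int) 0 = a.getD k 0 :=
        PySem.List.pyGetD_natCast a k 0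
      simp only [hcur, pop_bridge a k s r]
      have : ((a.getD k 0, (k : Int)) :: repS a (mpop a k s r).1) = repS a (mstep a (s, r) k).1 := by
        simp [repS, mstep]
      rw [this]
      exact ih (mstep a (s, r) k).1 (mstep a (s, r) k).2

-- ===== VERDICT (by name: the statement is the Claim_ definition above) =====
theorem find_migration_cities_spec : Claim_equal_find_migration_cities := by
  intro a n _ hpre
  unfold Spec_find_migration_cities find_migration_cities_alt
  simp only [find_migration_cities, PySem.List.pyRange_one, Int.sub_zero, Int.zero_add,
    List.foldl_map]
  rw [show ([] : List (Int × Int)) = repS a [] from rfl, port_bridge a (List.range n.toNat) []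
    (List.replicate n.toNat 0), drain_bridge]
  have hinv0 : InvA a n.toNat 0 [] (List.replicate n.toNat 0) :=
    ⟨by simp, by omega, by simp, by simp, by simp, fun j hj _ => absurd hj (by omega)⟩
  have hinv : InvA a n.toNat n.toNat
      ((List.range n.toNat).foldl (mstep a) ([], List.replicate n.toNat 0)).1
      ((List.range n.toNat).foldl (mstep a) ([], List.replicate n.toNat 0)).2 := by
    have h := fold_inv a n.toNat n.toNat 0 [] (List.replicate n.toNat 0) (by omega) hinv0
    rw [← List.range_eq_range'] at h
    simpa using h
  apply List.ext_getElem
  · rw [mdrain_length]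
    simp [hinv.1]
  · intro j h1 h2
    have hj : j < n.toNat := by simpa using h2
    have hv := mdrain_inv a n.toNat _ _ hinv j hj
    rw [List.getD_eq_getElem _ _ h1] at hv
    rw [hv]
    simp [nsp]
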